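-- pv_equiv track=rewrite | github.com/acneuromancer/algorithms | Python/reverse_words.py | reverse_3
-- ===== SOURCE A (Python) =====
-- def reverse_3(s):
--     length = len(s)
--     words = []
--     chars_to_skip = [",", ";", "-", "?", "!", ".", " "]
--     i = 0
--
--     while i < length:
--         if s[i] not in chars_to_skip:
--             j = i
--             word = ""
--             while j < length and s[j] not in chars_to_skip:
--                 word += s[j]
--                 j += 1
--
--             words.insert(0, word)
--             i = j+1
--         else:
--             i += 1
--
--     return words
-- ===== SOURCE B (Python) =====
-- def reverse_3(s):
--     delims = ",;-?!. "
--     words = []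
--     word = []
--     for c in s:
--         if c in delims:
--             if word:
--                 words.append("".join(word))
--                 word = []
--         else:
--             word.append(c)
--     if word:
--         words.append("".join(word))
--     return words[::-1]
-- ===== Notes on version B (the rewrite author's own statement) =====
-- stated objective: faster
-- what changed: Replaced A's index-based nested while loops with quadratic words.insert(0, ...) and string += by a single forward pass over the characters that appends finished words to a list and reverses it once at the end.
import Mathlib
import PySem

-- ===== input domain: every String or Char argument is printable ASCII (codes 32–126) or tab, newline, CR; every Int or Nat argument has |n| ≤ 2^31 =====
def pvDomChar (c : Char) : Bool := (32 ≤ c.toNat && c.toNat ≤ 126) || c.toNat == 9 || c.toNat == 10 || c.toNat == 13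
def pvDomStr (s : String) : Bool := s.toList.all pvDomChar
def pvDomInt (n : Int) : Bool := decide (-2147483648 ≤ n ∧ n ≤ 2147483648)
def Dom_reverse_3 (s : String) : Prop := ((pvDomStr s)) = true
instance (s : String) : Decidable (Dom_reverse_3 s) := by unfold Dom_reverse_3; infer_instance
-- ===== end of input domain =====

-- B replaces A's index-based nested while loops (with quadratic insert(0) and string +=)
-- by a single forward pass with an accumulator, appending finished words and reversing once at the end.

-- ===== PORT A =====
-- chars_to_skip
def pvSkip : List Char := [',', ';', '-', '?', '!', '.', ' ']

-- inner while loop of A: scan the word starting at j, return (final j, word);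
-- the fuel argument only makes the loop total (it never runs out on the calls made)
def pvInnerA (cs : List Char) : Nat → Nat → List Char → Nat × List Char
  | 0, j, word => (j, word)
  | fuel + 1, j, word =>
    if j < cs.length ∧ cs.getD j ' ' ∉ pvSkip then
      pvInnerA cs fuel (j + 1) (word ++ [cs.getD j ' '])
    else
      (j, word)

-- outer while loop of A (fuel: one unit per iteration; never runs out on the calls made)
def pvOuterA (cs : List Char) : Nat → Nat → List String → List String
  | 0, _, words => words
  | fuel + 1, i, words =>
    if i < cs.length then
      if cs.getD i ' ' ∉ pvSkip then
        let p := pvInnerA cs (cs.length - i) i []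
        pvOuterA cs fuel (p.1 + 1) (String.ofList p.2 :: words)
      else
        pvOuterA cs fuel (i + 1) words
    else
      words

def reverse_3 (s : String) : List String := pvOuterA s.toList s.toList.length 0 []

-- ===== PORT B =====
-- loop body of B: one character step over the state (finished words, current word)
def pvStepB (st : List String × List Char) (c : Char) : List String × List Char :=
  if c ∈ pvSkip then
    if st.2 = [] then st else (st.1 ++ [String.ofList st.2], [])
  else
    (st.1, st.2 ++ [c])

def reverse_3_alt (s : String) : List String :=
  let st := s.toList.foldl pvStepB ([], [])
  let out := if st.2 = [] then st.1 else st.1 ++ [String.ofList st.2]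
  out.reverse

-- ===== PRECONDITION & SPEC =====
def Spec_reverse_3 (s : String) (out : List String) : Prop := out = reverse_3_alt s
instance (s : String) (out : List String) : Decidable (Spec_reverse_3 s out) := by unfold Spec_reverse_3; infer_instance

-- ===== CLAIM (what is proved, stated in full; the proofs are below) =====
def Claim_equal_reverse_3 : Prop := ∀ (s : String), Dom_reverse_3 s → Spec_reverse_3 s (reverse_3 s)

-- ===== LEMMAS AND PROOFS =====

-- word characters: not a delimiter
def pvP (c : Char) : Bool := !(pvSkip.contains c)

theorem pvP_iff (c : Char) : pvP c = true ↔ c ∉ pvSkip := by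
  simp [pvP]

-- tokens of the rest of the string, with a pending (possibly empty) current word w in front
def pvTokensPre (w : List Char) : List Char → List (List Char)
  | [] => if w = [] then [] else [w]
  | c :: cs =>
    if pvP c then pvTokensPre (w ++ [c]) cs
    else if w = [] then pvTokensPre [] cs else w :: pvTokensPre [] cs

-- a leading delimiter is ignored when no word is pending
theorem pvTokensPre_cons_delim (c : Char) (cs : List Char) (h : pvP c = false) :
    pvTokensPre [] (c :: cs) = pvTokensPre [] cs := by
  simp [pvTokensPre, h]

-- a pending nonempty word absorbs the maximal run and is emitted
theorem pvTokensPre_word (cs : List Char) :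
    ∀ w : List Char, w ≠ [] →
      pvTokensPre w cs = (w ++ cs.takeWhile pvP) :: pvTokensPre [] (cs.dropWhile pvP) := by
  induction cs with
  | nil =>
    intro w hw
    simp [pvTokensPre, hw]
  | cons c cs ih =>
    intro w hw
    by_cases hP : pvP c = true
    · simp only [pvTokensPre, hP, if_pos]
      rw [ih (w ++ [c]) (by simp)]
      simp [hP]
    · have hP' : pvP c = false := by simpa using hP
      simp [pvTokensPre, hP', hw, pvTokensPre_cons_delim c cs hP']

-- the maximal run at index j starts with cs[j] when cs[j] is a word char
theorem pvTW_drop (cs : List Char) (j : Nat) (h : j < cs.length) (hP : pvP cs[j] = true) :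
    (cs.drop j).takeWhile pvP = cs[j] :: (cs.drop (j + 1)).takeWhile pvP := by
  rw [List.drop_eq_getElem_cons h, List.takeWhile_cons, if_pos hP]

-- the inner loop computes the maximal pvP-run of the suffix (given enough fuel)
theorem pvInnerA_eq (cs : List Char) (fuel : Nat) :
    ∀ (j : Nat) (word : List Char), cs.length ≤ j + fuel →
      pvInnerA cs fuel j word =
        (j + ((cs.drop j).takeWhile pvP).length, word ++ (cs.drop j).takeWhile pvP) := by
  induction fuel with
  | zero =>
    intro j word hf
    have h0 : cs.drop j = [] := List.drop_eq_nil_of_le (by omega)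
    simp [pvInnerA, h0]
  | succ fuel ih =>
    intro j word hf
    rcases Nat.lt_or_ge j cs.length with hj | hj
    · have hget : cs.getD j ' ' = cs[j] := List.getD_eq_getElem cs ' ' hj
      by_cases hc : cs[j] ∈ pvSkip
      · have hP : pvP cs[j] = false := by simp [pvP]; exact hc
        have hcond : ¬ (j < cs.length ∧ cs.getD j ' ' ∉ pvSkip) := by
          rw [hget]; tauto
        rw [pvInnerA, if_neg hcond, List.drop_eq_getElem_cons hj,
          List.takeWhile_cons, if_neg (by simp [hP])]
        simp
      · have hP : pvP cs[j] = true := (pvP_iff _).mpr hc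
        have hcond : j < cs.length ∧ cs.getD j ' ' ∉ pvSkip := by
          rw [hget]; exact ⟨hj, hc⟩
        rw [pvInnerA, if_pos hcond, ih (j + 1) (word ++ [cs.getD j ' ']) (by omega),
          pvTW_drop cs j hj hP, hget]
        simp
        omega
    · have h0 : cs.drop j = [] := List.drop_eq_nil_of_le hj
      have hcond : ¬ (j < cs.length ∧ cs.getD j ' ' ∉ pvSkip) := by omega
      rw [pvInnerA, if_neg hcond]
      simp [h0]

-- dropping the maximal run is dropWhile
theorem pv_drop_takeWhile (p : Char → Bool) (l : List Char) :
    l.drop (l.takeWhile p).length = l.dropWhile p := by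
  induction l with
  | nil => simp
  | cons c cs ih => by_cases hc : p c <;> simp [hc, ih]

-- the first character surviving dropWhile falsifies the predicate
theorem pv_dropWhile_head (p : Char → Bool) (l : List Char) (d : Char) (ds : List Char)
    (h : l.dropWhile p = d :: ds) : p d = false := by
  induction l with
  | nil => simp at h
  | cons c cs ih =>
    rw [List.dropWhile_cons] at h
    split at h
    · exact ih h
    · next hc => cases h; simpa using hc

-- after the word: dropping past the run is dropWhile of the suffix
theorem pvDW_drop (cs : List Char) (i : Nat) :
    cs.drop (i + ((cs.drop i).takeWhile pvP).length) = (cs.drop i).dropWhile pvP := by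
  have h1 : cs.drop (i + ((cs.drop i).takeWhile pvP).length)
      = (cs.drop i).drop ((cs.drop i).takeWhile pvP).length := (List.drop_drop).symm
  rw [h1]
  exact pv_drop_takeWhile pvP (cs.drop i)

-- the outer loop accumulates the reversed tokens of the suffix (given enough fuel)
theorem pvOuterA_eq (cs : List Char) (fuel : Nat) :
    ∀ (i : Nat) (words : List String), cs.length ≤ i + fuel →
      pvOuterA cs fuel i words =
        ((pvTokensPre [] (cs.drop i)).map String.ofList).reverse ++ words := by
  induction fuel with
  | zero =>
    intro i words hf
    have h0 : cs.drop i = [] := List.drop_eq_nil_of_le (by omega)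
    simp [pvOuterA, h0, pvTokensPre]
  | succ fuel ih =>
    intro i words hf
    rcases Nat.lt_or_ge i cs.length with hi | hi
    · have hget : cs.getD i ' ' = cs[i] := List.getD_eq_getElem cs ' ' hi
      by_cases hc : cs[i] ∈ pvSkip
      · -- delimiter: skip one character
        have hP : pvP cs[i] = false := by simp [pvP]; exact hc
        rw [pvOuterA, if_pos hi, if_neg (by rw [hget]; tauto),
          ih (i + 1) words (by omega), List.drop_eq_getElem_cons hi,
          pvTokensPre_cons_delim _ _ hP]
      · -- word character: the inner loop reads the whole run
        have hP : pvP cs[i] = true := (pvP_iff _).mpr hc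
        have hp := pvInnerA_eq cs (cs.length - i) i [] (by omega)
        have htw : (cs.drop i).takeWhile pvP = cs[i] :: (cs.drop (i + 1)).takeWhile pvP :=
          pvTW_drop cs i hi hP
        have hdw : cs.drop (i + ((cs.drop i).takeWhile pvP).length) = (cs.drop i).dropWhile pvP :=
          pvDW_drop cs i
        -- the continuation point: tokens of drop (j+1) = tokens of dropWhile
        have hrest : pvTokensPre [] (cs.drop (i + ((cs.drop i).takeWhile pvP).length + 1))
            = pvTokensPre [] ((cs.drop i).dropWhile pvP) := by
          rcases hdwcases : (cs.drop i).dropWhile pvP with _ | ⟨d, ds⟩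
          · have h1 := congrArg List.length hdw
            rw [hdwcases] at h1
            simp at h1
            have h0 : cs.drop (i + ((cs.drop i).takeWhile pvP).length + 1) = [] :=
              List.drop_eq_nil_of_le (by omega)
            simp [h0]
          · have hd : pvP d = false := pv_dropWhile_head pvP (cs.drop i) d ds hdwcases
            have hcons : cs.drop (i + ((cs.drop i).takeWhile pvP).length) = d :: ds := by
              rw [hdw, hdwcases]
            have hstep : cs.drop (i + ((cs.drop i).takeWhile pvP).length + 1) = ds := by
              have h2 : (cs.drop (i + ((cs.drop i).takeWhile pvP).length)).drop 1 = ds := by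
                rw [hcons]; simp
              rw [List.drop_drop] at h2
              exact h2
            rw [hstep]
            exact (pvTokensPre_cons_delim d ds hd).symm
        have hlen1 : 1 ≤ ((cs.drop i).takeWhile pvP).length := by
          rw [htw]; simp
        rw [pvOuterA, if_pos hi, if_pos (by rw [hget]; exact hc), hp]
        simp only [List.nil_append]
        rw [ih (i + ((cs.drop i).takeWhile pvP).length + 1)
            (String.ofList ((cs.drop i).takeWhile pvP) :: words) (by omega),
          hrest]
        -- fold one token emission into the spec side
        have htok : pvTokensPre [] (cs.drop i) =
            ((cs.drop i).takeWhile pvP) :: pvTokensPre [] ((cs.drop i).dropWhile pvP) := by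
          conv_lhs => rw [List.drop_eq_getElem_cons hi]
          simp only [pvTokensPre, hP, if_pos, List.nil_append]
          rw [pvTokensPre_word (cs.drop (i + 1)) [cs[i]] (by simp), htw]
          conv_rhs => rw [List.drop_eq_getElem_cons hi]
          rw [List.dropWhile_cons, if_pos hP]
          simp
        rw [htok]
        simp
    · rw [pvOuterA, if_neg (by omega)]
      have h0 : cs.drop i = [] := List.drop_eq_nil_of_le hi
      simp [h0, pvTokensPre]

-- flush of B's final state
def pvFlush (st : List String × List Char) : List String :=
  if st.2 = [] then st.1 else st.1 ++ [String.ofList st.2]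

-- B's fold, flushed, appends the pending-word tokens
theorem pvFoldB_eq (cs : List Char) :
    ∀ (out : List String) (w : List Char),
      pvFlush (cs.foldl pvStepB (out, w)) = out ++ (pvTokensPre w cs).map String.ofList := by
  induction cs with
  | nil =>
    intro out w
    rcases eq_or_ne w [] with hw | hw <;> simp [pvFlush, pvTokensPre, hw]
  | cons c cs ih =>
    intro out w
    by_cases hc : c ∈ pvSkip
    · have hP : pvP c = false := by simp [pvP]; exact hc
      rcases eq_or_ne w [] with hw | hw
      · have hs : pvStepB (out, w) c = (out, []) := by simp [pvStepB, hc, hw]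
        rw [List.foldl_cons, hs, ih out []]
        simp [pvTokensPre, hP, hw]
      · have hs : pvStepB (out, w) c = (out ++ [String.ofList w], []) := by
          simp [pvStepB, hc, hw]
        rw [List.foldl_cons, hs, ih (out ++ [String.ofList w]) []]
        simp [pvTokensPre, hP, hw]
    · have hP : pvP c = true := (pvP_iff _).mpr hc
      have hs : pvStepB (out, w) c = (out, w ++ [c]) := by simp [pvStepB, hc]
      rw [List.foldl_cons, hs, ih out (w ++ [c])]
      simp [pvTokensPre, hP]

-- ===== VERDICT (by name: the statement is the Claim_ definition above) =====
theorem reverse_3_spec : Claim_equal_reverse_3 := by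
  intro s _
  unfold Spec_reverse_3 reverse_3 reverse_3_alt
  rw [pvOuterA_eq s.toList s.toList.length 0 [] (by omega)]
  have hb := pvFoldB_eq s.toList [] []
  simp only [pvFlush] at hb
  simp only [List.drop_zero, List.append_nil]
  simp only [List.nil_append] at hb
  split
  · next h =>
    rw [if_pos h] at hb
    rw [hb]
  · next h =>
    rw [if_neg h] at hb
    rw [hb]
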